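-- pv_equiv track=rewrite | github.com/serim53/Algorithm | Baekjoon/B_16120.py | check
-- ===== SOURCE A (Python) =====
-- def check(input_str):
--     stack = []
--     flag = False
--     for str in input_str:
--         # if str == 'A' and (len(stack) < 2 or stack[-2:] != ['P', 'P']):
--         #     return flag
--         stack.append(str)
--         if len(stack) >= 4 and stack[-4:] == ['P', 'P', 'A', 'P']:
--             for _ in range(3):
--                 stack.pop()
--     if len(stack) == 1 and stack[0] == 'P':
--         flag = True
--     return flag
-- ===== SOURCE B (Python) =====
-- def check(input_str):
--     # Counter automaton with one-char lookahead: the stack of A is always a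
--     # run of 'P's, so we only track its height; 'A' must consume a following
--     # 'P' and needs at least two pending 'P's, anything else fails immediately.
--     cnt = 0
--     i = 0
--     n = len(input_str)
--     while i < n:
--         c = input_str[i]
--         if c == 'P':
--             cnt += 1
--             i += 1
--         elif c == 'A' and cnt >= 2 and i + 1 < n and input_str[i + 1] == 'P':
--             cnt -= 1
--             i += 2
--         else:
--             return False
--     return cnt == 1
-- ===== Notes on version B (the rewrite author's own statement) =====
-- stated objective: simpler
-- what changed: Replaces A's explicit character stack with PPAP-pattern popping by a counter of pending 'P's plus a one-character lookahead that fails fast on any invalid character.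
import Mathlib
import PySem

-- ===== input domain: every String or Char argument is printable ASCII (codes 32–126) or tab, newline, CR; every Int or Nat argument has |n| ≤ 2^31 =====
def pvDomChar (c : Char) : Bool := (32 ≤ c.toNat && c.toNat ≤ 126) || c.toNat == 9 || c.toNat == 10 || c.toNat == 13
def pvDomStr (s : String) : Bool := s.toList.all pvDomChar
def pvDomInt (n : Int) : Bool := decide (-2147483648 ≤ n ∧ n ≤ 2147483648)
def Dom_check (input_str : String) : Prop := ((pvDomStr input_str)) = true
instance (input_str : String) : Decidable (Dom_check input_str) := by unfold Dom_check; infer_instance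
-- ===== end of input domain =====

-- B replaces A's explicit character stack by a counter with one-char lookahead
-- (the stack is always a run of 'P's); objective: simpler, same O(n) cost.

-- ===== PORT A =====
-- The Python stack is stored top-first: `stack.append(c)` is cons, `stack[-4:] ==
-- ['P','P','A','P']` is `take 4 = ['P','A','P','P']`, popping 3 is `drop 3`,
-- `stack[0]` of a length-1 stack is `head?`.
def stepA (st : List Char) (c : Char) : List Char :=
  if (c :: st).length ≥ 4 ∧ (c :: st).take 4 = ['P', 'A', 'P', 'P']
  then (c :: st).drop 3 else (c :: st)

def checkLoop : List Char → List Char → List Char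
  | st, [] => st
  | st, c :: cs => checkLoop (stepA st c) cs

def finCheck (st : List Char) : Bool :=
  -- `flag = False`; `if len(stack) == 1 and stack[0] == 'P': flag = True`; `return flag`
  if st.length = 1 ∧ st.head? = some 'P' then true else false

def check (input_str : String) : Bool :=
  finCheck (checkLoop [] input_str.toList)

-- ===== PORT B =====
-- the while loop over the index i, with the one-char lookahead `input_str[i+1]`
def bLoop : List Char → Int → Bool
  | [], cnt => cnt == 1
  | c :: rest, cnt =>
    if c = 'P' then bLoop rest (cnt + 1)
    else if c = 'A' ∧ cnt ≥ 2 then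
      match rest with
      | c2 :: rest2 => if c2 = 'P' then bLoop rest2 (cnt - 1) else false
      | [] => false
    else false

def check_alt (input_str : String) : Bool :=
  bLoop input_str.toList 0

-- ===== PRECONDITION & SPEC =====
def Spec_check (input_str : String) (out : Bool) : Prop := out = check_alt input_str
instance (input_str : String) (out : Bool) : Decidable (Spec_check input_str out) := by unfold Spec_check; infer_instance

-- ===== CLAIM (what is proved, stated in full; the proofs are below) =====
def Claim_equal_check : Prop := ∀ (input_str : String), Dom_check input_str → Spec_check input_str (check input_str)

-- ===== LEMMAS AND PROOFS =====

-- An "inert" suffix fz of the stack is never touched by a pop, because a pop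
-- that reaches into it would need fz to start with 'P','P' (depth 2) or
-- 'A','P','P' (depth 3); a pop at depth exactly 3 leaves fz intact.
theorem checkLoop_inert (fz : List Char)
    (hc1 : fz.take 3 ≠ ['A', 'P', 'P'])
    (hc2 : fz.take 2 ≠ ['P', 'P']) :
    ∀ (chars top : List Char), ∃ top', checkLoop (top ++ fz) chars = top' ++ fz := by
  intro chars
  induction chars with
  | nil => intro top; exact ⟨top, rfl⟩
  | cons c rest ih =>
    intro top
    have hstep : ∃ t2, stepA (top ++ fz) c = t2 ++ fz := by
      unfold stepA
      split
      · rename_i h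
        match top with
        | [] =>
          exfalso
          apply hc1
          have := h.2
          cases fz with
          | nil => simp at this
          | cons a l =>
            cases l with
            | nil => simp at this
            | cons b l2 =>
              cases l2 with
              | nil => simp at this
              | cons d l3 => simp_all
        | [t0] =>
          exfalso
          apply hc2
          have := h.2
          cases fz with
          | nil => simp at this
          | cons a l =>
            cases l with
            | nil => simp at this
            | cons b l2 => simp_all
        | [t0, t1] => exact ⟨[], by simp⟩
        | t0 :: t1 :: t2 :: ts => exact ⟨t2 :: ts, by simp⟩
      · exact ⟨c :: top, rfl⟩
    obtain ⟨t2, h⟩ := hstep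
    have := ih t2
    simpa [checkLoop, h] using this

theorem finCheck_long (t fz : List Char) (h : 2 ≤ fz.length) :
    finCheck (t ++ fz) = false := by
  unfold finCheck
  rw [if_neg]
  rintro ⟨h1, -⟩
  simp [List.length_append] at h1
  omega

theorem finCheck_single (t : List Char) (c : Char) (hc : c ≠ 'P') :
    finCheck (t ++ [c]) = false := by
  cases t with
  | nil => simp [finCheck, hc]
  | cons a t' =>
    unfold finCheck
    rw [if_neg]
    rintro ⟨h1, -⟩
    simp [List.length_append] at h1

theorem bLoop_cons (c : Char) (rest : List Char) (cnt : Int) :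
    bLoop (c :: rest) cnt =
      (if c = 'P' then bLoop rest (cnt + 1)
       else if c = 'A' ∧ cnt ≥ 2 then
         match rest with
         | c2 :: rest2 => if c2 = 'P' then bLoop rest2 (cnt - 1) else false
         | [] => false
       else false) := by cases rest <;> rfl

theorem fin_replicate (n : Nat) : finCheck (List.replicate n 'P') = bLoop [] (n : Int) := by
  simp only [finCheck, bLoop]
  split
  · rename_i h
    have hn : n = 1 := by simpa using h.1
    subst hn; simp
  · rename_i h
    have hn : n ≠ 1 := by
      intro e; subst e; exact h ⟨by simp, by simp⟩
    have : ((n : Int) == 1) = false := by simp; omega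
    rw [this]

theorem take_replicate_P_ne (m : Nat) :
    (List.replicate m 'P').take 4 ≠ ['P', 'A', 'P', 'P'] := by
  intro h
  rw [List.take_replicate] at h
  have : 'A' ∈ List.replicate (min 4 m) 'P' := by rw [h]; simp
  simp at this

theorem stepA_push_P (n : Nat) :
    stepA (List.replicate n 'P') 'P' = List.replicate (n + 1) 'P' := by
  unfold stepA
  rw [if_neg]
  · simp [List.replicate_succ]
  · rintro ⟨-, h⟩
    exact take_replicate_P_ne (n + 1) (by simpa [List.replicate_succ] using h)

theorem stepA_push_A (n : Nat) :
    stepA (List.replicate n 'P') 'A' = 'A' :: List.replicate n 'P' := by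
  unfold stepA
  rw [if_neg]
  rintro ⟨-, h⟩
  cases n with
  | zero => simp at h
  | succ m => simp [List.replicate_succ] at h

theorem stepA_no_pop (st : List Char) (c : Char) (hc : c ≠ 'P') :
    stepA st c = c :: st := by
  unfold stepA
  rw [if_neg]
  rintro ⟨-, h⟩
  cases st <;> simp_all

-- main invariant: A's stack is always a run of 'P's of height cnt
theorem main_inv : ∀ (k : Nat) (chars : List Char), chars.length ≤ k → ∀ (n : Nat),
    finCheck (checkLoop (List.replicate n 'P') chars) = bLoop chars (n : Int) := by
  intro k
  induction k with
  | zero =>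
    intro chars hl n
    have hc : chars = [] := List.eq_nil_of_length_eq_zero (Nat.le_zero.mp hl)
    subst hc
    exact fin_replicate n
  | succ k ih =>
    intro chars hl n
    match chars with
    | [] => exact fin_replicate n
    | c :: rest =>
      by_cases hP : c = 'P'
      · subst hP
        simp only [checkLoop, stepA_push_P]
        rw [ih rest (by simp at hl; omega) (n + 1), bLoop_cons, if_pos rfl]
        norm_num
      · by_cases hA : c = 'A'
        · subst hA
          simp only [checkLoop, stepA_push_A]
          match n with
          | 0 =>
            obtain ⟨t, ht⟩ := checkLoop_inert ['A'] (by decide) (by decide) rest []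
            simp only [List.replicate, List.nil_append] at ht ⊢
            rw [ht, finCheck_single t 'A' (by decide), bLoop_cons,
              if_neg (by decide), if_neg (by rintro ⟨-, h⟩; omega)]
          | 1 =>
            obtain ⟨t, ht⟩ := checkLoop_inert ['A', 'P'] (by decide) (by decide) rest []
            simp only [List.replicate, List.nil_append] at ht ⊢
            rw [ht, finCheck_long t _ (by simp), bLoop_cons,
              if_neg (by decide), if_neg (by rintro ⟨-, h⟩; omega)]
          | (m + 2) =>
            match rest with
            | [] =>
              simp only [checkLoop]
              rw [show 'A' :: List.replicate (m + 2) 'P' = [] ++ ('A' :: List.replicate (m + 2) 'P') by simp,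
                finCheck_long [] _ (by simp), bLoop_cons]
              rw [if_neg (by decide),
                if_pos (show 'A' = 'A' ∧ ((m + 2 : Nat) : Int) ≥ 2 from ⟨rfl, by push_cast; omega⟩)]
            | d :: rest2 =>
              by_cases hd : d = 'P'
              · subst hd
                have hpop : stepA ('A' :: List.replicate (m + 2) 'P') 'P'
                    = List.replicate (m + 1) 'P' := by
                  unfold stepA
                  rw [if_pos (by refine ⟨?_, ?_⟩ <;> simp [List.replicate_succ])]
                  simp [List.replicate_succ]
                simp only [checkLoop, hpop]
                rw [ih rest2 (by simp at hl; omega) (m + 1), bLoop_cons,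
                  if_neg (by decide),
                  if_pos (show 'A' = 'A' ∧ ((m + 2 : Nat) : Int) ≥ 2 from ⟨rfl, by push_cast; omega⟩)]
                simp
                congr 1
                omega
              · have hnp : stepA ('A' :: List.replicate (m + 2) 'P') d
                    = d :: 'A' :: List.replicate (m + 2) 'P' := by
                  unfold stepA
                  rw [if_neg]
                  rintro ⟨-, h⟩
                  simp [List.replicate_succ] at h
                  exact hd h
                obtain ⟨t, ht⟩ := checkLoop_inert (d :: 'A' :: List.replicate (m + 2) 'P')
                  (by simp [List.replicate_succ]) (by simp) rest2 []
                simp only [List.nil_append] at ht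
                simp only [checkLoop, hnp, ht]
                rw [finCheck_long t _ (by simp), bLoop_cons,
                  if_neg (by decide),
                  if_pos (show 'A' = 'A' ∧ ((m + 2 : Nat) : Int) ≥ 2 from ⟨rfl, by push_cast; omega⟩)]
                simp [hd]
        · -- c is neither 'P' nor 'A'
          simp only [checkLoop, stepA_no_pop _ c hP]
          have hc1 : (c :: List.replicate n 'P').take 3 ≠ ['A', 'P', 'P'] := by
            simp [hA]
          have hc2 : (c :: List.replicate n 'P').take 2 ≠ ['P', 'P'] := by
            simp [hP]
          obtain ⟨t, ht⟩ := checkLoop_inert (c :: List.replicate n 'P') hc1 hc2 rest []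
          simp only [List.nil_append] at ht
          rw [ht]
          have hfalse : finCheck (t ++ c :: List.replicate n 'P') = false := by
            match n with
            | 0 => exact finCheck_single t c hP
            | (m + 1) => exact finCheck_long t _ (by simp)
          rw [hfalse, bLoop_cons, if_neg hP, if_neg (by rintro ⟨h, -⟩; exact hA h)]

-- ===== VERDICT (by name: the statement is the Claim_ definition above) =====
theorem check_spec : Claim_equal_check := by
  intro s _
  unfold Spec_check check check_alt
  have := main_inv s.toList.length s.toList le_rfl 0
  simpa using this
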